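-- pv_equiv track=rewrite | github.com/ngv2003/pulse-incident-management | pulse_watcher.py | get_dependency_chain
-- ===== SOURCE A (Python) =====
-- def get_dependency_chain(service, config):
--     """Get all services connected to this service (upstream + downstream)."""
--     services = config.get("services", {})
--     related = set()
--
--     def walk_down(svc):
--         if svc in related: return
--         related.add(svc)
--         for dep in services.get(svc, {}).get("calls", []):
--             walk_down(dep)
--
--     def walk_up(svc):
--         if svc in related: return
--         related.add(svc)
--         for s, cfg in services.items():
--             if svc in cfg.get("calls", []):
--                 walk_up(s)
--
--     walk_down(service)
--     walk_up(service)
--     return related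
-- ===== SOURCE B (Python) =====
-- def get_dependency_chain(service, config):
--     """Get all services connected to this service (upstream + downstream)."""
--     services = config.get("services", {})
--     related = set()
--     stack = [service]
--     while stack:
--         x = stack.pop(0)
--         if x not in related:
--             related.add(x)
--             stack = services.get(x, {}).get("calls", []) + stack
--     return related
-- ===== Notes on version B (the rewrite author's own statement) =====
-- stated objective: simpler
-- what changed: Replaces the recursive walk_down plus the dead walk_up pass (a no-op, since the start service is already in the set when walk_up runs) with a single iterative explicit-stack DFS loop.
import Mathlib
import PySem

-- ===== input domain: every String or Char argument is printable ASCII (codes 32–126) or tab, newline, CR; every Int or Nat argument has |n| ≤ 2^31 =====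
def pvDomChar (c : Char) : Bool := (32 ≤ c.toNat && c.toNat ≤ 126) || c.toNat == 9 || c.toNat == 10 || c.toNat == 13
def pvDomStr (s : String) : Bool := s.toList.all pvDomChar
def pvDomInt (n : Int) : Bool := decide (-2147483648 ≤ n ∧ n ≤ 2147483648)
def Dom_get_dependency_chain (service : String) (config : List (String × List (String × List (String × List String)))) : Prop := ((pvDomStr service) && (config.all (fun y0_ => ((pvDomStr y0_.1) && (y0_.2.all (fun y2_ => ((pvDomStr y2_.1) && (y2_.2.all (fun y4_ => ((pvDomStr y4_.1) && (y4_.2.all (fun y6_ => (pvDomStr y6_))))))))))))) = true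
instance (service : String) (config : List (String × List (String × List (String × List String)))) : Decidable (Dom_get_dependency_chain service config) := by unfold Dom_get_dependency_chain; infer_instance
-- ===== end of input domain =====

-- B replaces A's recursive walk_down plus its dead walk_up pass (a no-op: the start
-- service is already in the set when walk_up runs) with one iterative explicit-stack
-- DFS loop — objective: simpler. Return value only; neither version mutates its input.

-- ===== PORT A =====
-- shared helpers: cfg.get("calls", []), services.get(svc, {}).get("calls", []), services = config.get("services", {})
def pvCfgCalls (cfg : List (String × List String)) : List String :=
  PySem.Dict.getD (PySem.Dict.mk cfg) "calls" []

def pvCalls (sv : List (String × List (String × List String))) (x : String) : List String :=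
  pvCfgCalls (PySem.Dict.getD (PySem.Dict.mk sv) x [])

def pvServices (config : List (String × List (String × List (String × List String)))) :
    List (String × List (String × List String)) :=
  PySem.Dict.getD (PySem.Dict.mk config) "services" []

-- every name occurring in the services mapping (keys and call targets); its length
-- bounds the recursion depth, so (length + 2) serves as fuel for A's recursion
def pvAllNodes (sv : List (String × List (String × List String))) : List String :=
  sv.flatMap (fun e => e.1 :: pvCfgCalls e.2)

-- walk_down: fuel only guards totality (never exhausted with the fuel chosen below)
mutual
def pvWalkDown (sv : List (String × List (String × List String))) :
    Nat → List String → String → List String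
  | 0, rel, _ => rel
  | f+1, rel, svc =>
      if PySem.Set.contains rel svc then rel
      else pvWalkDownList sv f (PySem.Set.add rel svc) (pvCalls sv svc)
termination_by f _ _ => (f, 0)

def pvWalkDownList (sv : List (String × List (String × List String))) :
    Nat → List String → List String → List String
  | _, rel, [] => rel
  | f, rel, d :: ds => pvWalkDownList sv f (pvWalkDown sv f rel d) ds
termination_by f _ ds => (f, ds.length + 1)
end

-- walk_up: same fuel discipline
mutual
def pvWalkUp (sv : List (String × List (String × List String))) :
    Nat → List String → String → List String
  | 0, rel, _ => rel
  | f+1, rel, svc =>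
      if PySem.Set.contains rel svc then rel
      else pvWalkUpItems sv f (PySem.Set.add rel svc) svc sv
termination_by f _ _ => (f, 0)

def pvWalkUpItems (sv : List (String × List (String × List String))) :
    Nat → List String → String → List (String × List (String × List String)) → List String
  | _, rel, _, [] => rel
  | f, rel, svc, e :: rest =>
      pvWalkUpItems sv f (if svc ∈ pvCfgCalls e.2 then pvWalkUp sv f rel e.1 else rel) svc rest
termination_by f _ _ items => (f, items.length + 1)
end

def get_dependency_chain (service : String) (config : List (String × List (String × List (String × List String)))) : List String :=
  let sv := pvServices config
  let rel := pvWalkDown sv ((pvAllNodes sv).length + 2) PySem.Set.empty service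
  pvWalkUp sv ((pvAllNodes sv).length + 2) rel service

-- ===== PORT B =====
-- fuel for the while loop: current stack length plus, for every not-yet-visited name,
-- 1 + the length of its calls list — an upper bound on the remaining iterations
def pvW (sv : List (String × List (String × List String))) (rel : List String) : Nat :=
  (((PySem.List.dedup (pvAllNodes sv)).filter (fun y => decide (y ∉ rel))).map
    (fun x => (pvCalls sv x).length + 1)).sum

def pvBm (sv : List (String × List (String × List String))) (rel stack : List String) : Nat :=
  stack.length + pvW sv rel

def pvLoop (sv : List (String × List (String × List String))) :
    Nat → List String → List String → List String
  | _, rel, [] => rel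
  | 0, rel, _ :: _ => rel
  | f+1, rel, x :: rest =>
      if PySem.Set.contains rel x then pvLoop sv f rel rest
      else pvLoop sv f (PySem.Set.add rel x) (pvCalls sv x ++ rest)

def get_dependency_chain_alt (service : String) (config : List (String × List (String × List (String × List String)))) : List String :=
  let sv := pvServices config
  pvLoop sv (pvBm sv PySem.Set.empty [service]) PySem.Set.empty [service]

-- ===== PRECONDITION & SPEC =====
def Spec_get_dependency_chain (service : String) (config : List (String × List (String × List (String × List String)))) (out : List String) : Prop := out = get_dependency_chain_alt service config
instance (service : String) (config : List (String × List (String × List (String × List String)))) (out : List String) : Decidable (Spec_get_dependency_chain service config out) := by unfold Spec_get_dependency_chain; infer_instance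

-- ===== CLAIM (what is proved, stated in full; the proofs are below) =====
def Claim_equal_get_dependency_chain : Prop := ∀ (service : String) (config : List (String × List (String × List (String × List String)))), Dom_get_dependency_chain service config → Spec_get_dependency_chain service config (get_dependency_chain service config)

-- ===== LEMMAS AND PROOFS =====

-- number of names not yet visited: the termination measure of the recursion
def pvM (sv : List (String × List (String × List String))) (rel : List String) : Nat :=
  ((PySem.List.dedup (pvAllNodes sv)).filter (fun y => decide (y ∉ rel))).length

-- the loop run with exactly enough fuel (canonical form; fuel-irrelevance below)
def pvLoopInf (sv : List (String × List (String × List String))) (rel stack : List String) : List String :=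
  pvLoop sv (pvBm sv rel stack) rel stack

-- a name not occurring in the services mapping has no calls list
lemma pvCalls_of_not_mem (sv : List (String × List (String × List String))) (x : String)
    (h : x ∉ pvAllNodes sv) : pvCalls sv x = [] := by
  have hk : x ∉ (PySem.Dict.mk sv).keys := by
    intro hmem
    apply h
    simp [PySem.Dict.keys] at hmem
    obtain ⟨c, hc⟩ := hmem
    simp [pvAllNodes, List.mem_flatMap]
    exact ⟨x, c, hc, Or.inl rfl⟩
  have hnone : (PySem.Dict.mk sv).get? x = none :=
    (PySem.Dict.get?_eq_none_iff_not_mem_keys _ x).mpr hk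
  unfold pvCalls
  rw [PySem.Dict.getD_eq_get?_getD, hnone]
  rfl

-- visiting a fresh listed name removes exactly its entry from the unvisited filter
lemma pvFilter_perm (l rel : List String) (x : String) (hnd : l.Nodup) (hx : x ∈ l) (hxr : x ∉ rel) :
    List.Perm (l.filter (fun y => decide (y ∉ rel))) (x :: l.filter (fun y => decide (y ∉ rel ++ [x]))) := by
  have h1 : l.filter (fun y => decide (y ∉ rel ++ [x]))
      = (l.filter (fun y => decide (y ∉ rel))).filter (fun y => y != x) := by
    rw [List.filter_filter]
    apply List.filter_congr
    intro y _
    rw [Bool.eq_iff_iff]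
    simp [List.mem_append, bne]
    tauto
  have hmem : x ∈ l.filter (fun y => decide (y ∉ rel)) := List.mem_filter.mpr ⟨hx, by simpa⟩
  have hnd2 : (l.filter (fun y => decide (y ∉ rel))).Nodup := hnd.filter _
  have h2 := hnd2.erase_eq_filter x
  rw [h1, ← h2]
  exact List.perm_cons_erase hmem

lemma pvM_step_mem (sv : List (String × List (String × List String))) (rel : List String) (x : String)
    (hx : x ∈ pvAllNodes sv) (hxr : x ∉ rel) : pvM sv (rel ++ [x]) + 1 = pvM sv rel := by
  have hp := pvFilter_perm (PySem.List.dedup (pvAllNodes sv)) rel x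
    (PySem.List.nodup_dedup _) ((PySem.List.mem_dedup _ _).mpr hx) hxr
  have := hp.length_eq
  simp [pvM] at this ⊢
  omega

lemma pvW_step_mem (sv : List (String × List (String × List String))) (rel : List String) (x : String)
    (hx : x ∈ pvAllNodes sv) (hxr : x ∉ rel) :
    pvW sv (rel ++ [x]) + ((pvCalls sv x).length + 1) = pvW sv rel := by
  have hp := pvFilter_perm (PySem.List.dedup (pvAllNodes sv)) rel x
    (PySem.List.nodup_dedup _) ((PySem.List.mem_dedup _ _).mpr hx) hxr
  have := (hp.map (fun x => (pvCalls sv x).length + 1)).sum_eq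
  simp [pvW] at this ⊢
  omega

lemma pvFilter_step_not_mem (l rel : List String) (x : String) (hsub : ∀ y ∈ l, y ≠ x) :
    l.filter (fun y => decide (y ∉ rel ++ [x])) = l.filter (fun y => decide (y ∉ rel)) := by
  apply List.filter_congr
  intro y hy
  simp [List.mem_append, hsub y hy]

lemma pvM_step_not_mem (sv : List (String × List (String × List String))) (rel : List String) (x : String)
    (hx : x ∉ pvAllNodes sv) : pvM sv (rel ++ [x]) = pvM sv rel := by
  unfold pvM
  rw [pvFilter_step_not_mem]
  intro y hy
  rw [PySem.List.mem_dedup] at hy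
  exact fun he => hx (he ▸ hy)

lemma pvW_step_not_mem (sv : List (String × List (String × List String))) (rel : List String) (x : String)
    (hx : x ∉ pvAllNodes sv) : pvW sv (rel ++ [x]) = pvW sv rel := by
  unfold pvW
  rw [pvFilter_step_not_mem]
  intro y hy
  rw [PySem.List.mem_dedup] at hy
  exact fun he => hx (he ▸ hy)

lemma pvM_anti (sv : List (String × List (String × List String))) (rel rel' : List String)
    (h : rel ⊆ rel') : pvM sv rel' ≤ pvM sv rel := by
  apply List.Sublist.length_le
  apply List.monotone_filter_right
  intro a ha
  simp at ha ⊢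
  exact fun hmem => ha (h hmem)

-- rel only grows through the recursion
lemma pvWalkDown_mono (sv : List (String × List (String × List String))) :
    ∀ f, (∀ rel s, rel ⊆ pvWalkDown sv f rel s) ∧ (∀ l rel, rel ⊆ pvWalkDownList sv f rel l) := by
  intro f
  induction f with
  | zero =>
    refine ⟨fun rel s => by simp [pvWalkDown], ?_⟩
    intro l
    induction l with
    | nil => intro rel; simp [pvWalkDownList]
    | cons d ds ih =>
      intro rel
      rw [pvWalkDownList]
      simpa [pvWalkDown] using ih rel
  | succ f ih =>
    have hV : ∀ rel s, rel ⊆ pvWalkDown sv (f + 1) rel s := by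
      intro rel s
      rw [pvWalkDown]
      split
      · exact fun a ha => ha
      · refine List.Subset.trans ?_ (ih.2 _ _)
        intro a ha
        rw [PySem.Set.mem_add]
        exact Or.inl ha
    refine ⟨hV, ?_⟩
    intro l
    induction l with
    | nil => intro rel; simp [pvWalkDownList]
    | cons d ds ihl =>
      intro rel
      rw [pvWalkDownList]
      exact List.Subset.trans (hV rel d) (ihl _)

-- fuel-irrelevance of the loop: any fuel ≥ pvBm gives the same result
lemma pvLoop_fuel (sv : List (String × List (String × List String))) :
    ∀ k f g rel stack, pvBm sv rel stack ≤ k → pvBm sv rel stack ≤ f → pvBm sv rel stack ≤ g →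
      pvLoop sv f rel stack = pvLoop sv g rel stack := by
  intro k
  induction k with
  | zero =>
    intro f g rel stack hk _ _
    cases stack with
    | nil => simp [pvLoop]
    | cons x rest => exfalso; simp [pvBm] at hk
  | succ k ih =>
    intro f g rel stack hk hf hg
    cases stack with
    | nil => simp [pvLoop]
    | cons x rest =>
      have hBm1 : 1 ≤ pvBm sv rel (x :: rest) := by simp [pvBm]; omega
      obtain ⟨f', rfl⟩ : ∃ f', f = f' + 1 := ⟨f - 1, by omega⟩
      obtain ⟨g', rfl⟩ : ∃ g', g = g' + 1 := ⟨g - 1, by omega⟩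
      rw [pvLoop, pvLoop]
      by_cases hx : x ∈ rel
      · have hc : PySem.Set.contains rel x = true := by
          simpa using (PySem.Set.contains_iff rel x).mpr hx
        simp only [hc, if_true]
        have hB : pvBm sv rel rest + 1 = pvBm sv rel (x :: rest) := by
          simp [pvBm]; omega
        exact ih f' g' rel rest (by omega) (by omega) (by omega)
      · have hc : PySem.Set.contains rel x = false := by
          exact Bool.eq_false_iff.mpr (fun hv => hx ((PySem.Set.contains_iff rel x).mp hv))
        simp only [hc, if_false, Bool.false_eq_true]
        rw [PySem.Set.add_of_not_mem hx]
        have hstep : pvBm sv (rel ++ [x]) (pvCalls sv x ++ rest) + 1 ≤ pvBm sv rel (x :: rest) := by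
          by_cases hall : x ∈ pvAllNodes sv
          · have := pvW_step_mem sv rel x hall hx
            simp [pvBm]; omega
          · have h0 := pvCalls_of_not_mem sv x hall
            have := pvW_step_not_mem sv rel x hall
            simp [pvBm, h0]; omega
        exact ih f' g' _ _ (by omega) (by omega) (by omega)

lemma pvLoop_eq_inf (sv : List (String × List (String × List String))) (f : Nat) (rel stack : List String)
    (h : pvBm sv rel stack ≤ f) : pvLoop sv f rel stack = pvLoopInf sv rel stack :=
  pvLoop_fuel sv f f (pvBm sv rel stack) rel stack h h le_rfl

lemma pvLoopInf_nil (sv : List (String × List (String × List String))) (rel : List String) :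
    pvLoopInf sv rel [] = rel := by simp [pvLoopInf, pvLoop]

lemma pvLoopInf_cons_mem (sv : List (String × List (String × List String))) (rel : List String)
    (x : String) (rest : List String) (h : x ∈ rel) :
    pvLoopInf sv rel (x :: rest) = pvLoopInf sv rel rest := by
  have h1 : pvBm sv rel (x :: rest) = pvBm sv rel rest + 1 := by simp [pvBm]; omega
  have hc : PySem.Set.contains rel x = true := by
    simpa using (PySem.Set.contains_iff rel x).mpr h
  show pvLoop sv (pvBm sv rel (x :: rest)) rel (x :: rest) = _
  rw [h1, pvLoop]
  simp only [hc, if_true]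
  rfl

lemma pvLoopInf_cons_new (sv : List (String × List (String × List String))) (rel : List String)
    (x : String) (rest : List String) (h : x ∉ rel) :
    pvLoopInf sv rel (x :: rest) = pvLoopInf sv (rel ++ [x]) (pvCalls sv x ++ rest) := by
  have h1 : pvBm sv rel (x :: rest) = pvBm sv rel rest + 1 := by simp [pvBm]; omega
  have hc : PySem.Set.contains rel x = false := by
    exact Bool.eq_false_iff.mpr (fun hv => h ((PySem.Set.contains_iff rel x).mp hv))
  have hstep : pvBm sv (rel ++ [x]) (pvCalls sv x ++ rest) ≤ pvBm sv rel rest := by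
    by_cases hall : x ∈ pvAllNodes sv
    · have := pvW_step_mem sv rel x hall h
      simp [pvBm]; omega
    · have h0 := pvCalls_of_not_mem sv x hall
      have := pvW_step_not_mem sv rel x hall
      simp [pvBm, h0]; omega
  show pvLoop sv (pvBm sv rel (x :: rest)) rel (x :: rest) = _
  rw [h1, pvLoop]
  simp only [hc, if_false, Bool.false_eq_true]
  rw [PySem.Set.add_of_not_mem h]
  exact pvLoop_eq_inf sv _ _ _ hstep

-- the bridge: running the stack loop over l ++ rest = recursing over l, then the loop on rest
lemma pvMain (sv : List (String × List (String × List String))) :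
    ∀ n l rel rest f, pvM sv rel ≤ n → pvM sv rel + 1 ≤ f →
      pvLoopInf sv rel (l ++ rest) = pvLoopInf sv (pvWalkDownList sv f rel l) rest := by
  intro n
  induction n using Nat.strong_induction_on with
  | _ n IHn =>
    intro l
    induction l with
    | nil =>
      intro rel rest f _ _
      simp [pvWalkDownList]
    | cons d ds IHl =>
      intro rel rest f hn hf
      obtain ⟨f', rfl⟩ : ∃ f', f = f' + 1 := ⟨f - 1, by omega⟩
      rw [pvWalkDownList]
      by_cases hd : d ∈ rel
      · have hc : PySem.Set.contains rel d = true := by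
          simpa using (PySem.Set.contains_iff rel d).mpr hd
        have hV : pvWalkDown sv (f' + 1) rel d = rel := by
          rw [pvWalkDown]; simp only [hc, if_true]
        rw [hV, List.cons_append, pvLoopInf_cons_mem sv rel d _ hd]
        exact IHl rel rest (f' + 1) hn hf
      · have hc : PySem.Set.contains rel d = false := by
          exact Bool.eq_false_iff.mpr (fun hv => hd ((PySem.Set.contains_iff rel d).mp hv))
        have hV : pvWalkDown sv (f' + 1) rel d
            = pvWalkDownList sv f' (rel ++ [d]) (pvCalls sv d) := by
          rw [pvWalkDown, if_neg (fun hv => hd ((PySem.Set.contains_iff rel d).mp hv)), PySem.Set.add_of_not_mem hd]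
        rw [List.cons_append, pvLoopInf_cons_new sv rel d _ hd]
        by_cases hall : d ∈ pvAllNodes sv
        · have hm : pvM sv (rel ++ [d]) + 1 = pvM sv rel := pvM_step_mem sv rel d hall hd
          have hn1 : 1 ≤ n := by omega
          have h1 : pvLoopInf sv (rel ++ [d]) (pvCalls sv d ++ (ds ++ rest))
              = pvLoopInf sv (pvWalkDownList sv f' (rel ++ [d]) (pvCalls sv d)) (ds ++ rest) :=
            IHn (n - 1) (by omega) (pvCalls sv d) (rel ++ [d]) (ds ++ rest) f' (by omega) (by omega)
          have hsub : rel ++ [d] ⊆ pvWalkDownList sv f' (rel ++ [d]) (pvCalls sv d) :=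
            (pvWalkDown_mono sv f').2 _ _
          have hm2 : pvM sv (pvWalkDownList sv f' (rel ++ [d]) (pvCalls sv d)) ≤ pvM sv (rel ++ [d]) :=
            pvM_anti sv _ _ hsub
          rw [← hV] at hm2
          have h2 : pvLoopInf sv (pvWalkDownList sv f' (rel ++ [d]) (pvCalls sv d)) (ds ++ rest)
              = pvLoopInf sv (pvWalkDownList sv (f' + 1) (pvWalkDown sv (f' + 1) rel d) ds) rest := by
            rw [← hV]
            exact IHn (n - 1) (by omega) ds _ rest (f' + 1) (by omega) (by omega)
          rw [h1, h2]
        · have h0 := pvCalls_of_not_mem sv d hall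
          have hm : pvM sv (rel ++ [d]) = pvM sv rel := pvM_step_not_mem sv rel d hall
          have hV2 : pvWalkDown sv (f' + 1) rel d = rel ++ [d] := by
            rw [hV, h0, pvWalkDownList]
          rw [h0, hV2, List.nil_append]
          exact IHl (rel ++ [d]) rest (f' + 1) (by omega) (by omega)

lemma pvWalkUp_of_mem (sv : List (String × List (String × List String))) (f : Nat)
    (rel : List String) (svc : String) (h : svc ∈ rel) : pvWalkUp sv f rel svc = rel := by
  have hc : PySem.Set.contains rel svc = true := by
    simpa using (PySem.Set.contains_iff rel svc).mpr h
  cases f with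
  | zero => rw [pvWalkUp]
  | succ f => rw [pvWalkUp, if_pos hc]

lemma pvMem_walkDown (sv : List (String × List (String × List String))) (f : Nat)
    (rel : List String) (s : String) : s ∈ pvWalkDown sv (f + 1) rel s := by
  rw [pvWalkDown]
  split
  · next hc => exact (PySem.Set.contains_iff rel s).mp hc
  · apply (pvWalkDown_mono sv f).2
    rw [PySem.Set.mem_add]
    exact Or.inr rfl

-- ===== VERDICT (by name: the statement is the Claim_ definition above) =====
theorem get_dependency_chain_spec : Claim_equal_get_dependency_chain := by
  intro service config _
  unfold Spec_get_dependency_chain get_dependency_chain get_dependency_chain_alt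
  show pvWalkUp (pvServices config) _ _ _ = _
  set sv := pvServices config with hsv
  set N := (pvAllNodes sv).length with hN
  have hmem : service ∈ pvWalkDown sv (N + 2) PySem.Set.empty service :=
    pvMem_walkDown sv (N + 1) PySem.Set.empty service
  rw [pvWalkUp_of_mem sv _ _ _ hmem]
  have hAlt : pvLoop sv (pvBm sv PySem.Set.empty [service]) PySem.Set.empty [service]
      = pvLoopInf sv [] [service] := rfl
  rw [hAlt]
  have hs0 : service ∉ ([] : List String) := by simp
  rw [pvLoopInf_cons_new sv [] service [] hs0, List.nil_append]
  have hMle : pvM sv [service] ≤ N := by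
    have h1 : pvM sv [service] ≤ (PySem.List.dedup (pvAllNodes sv)).length :=
      List.length_filter_le _ _
    have h2 : (PySem.List.dedup (pvAllNodes sv)).length ≤ N := by
      rw [PySem.List.dedup_eq_ofList]
      exact PySem.Set.length_ofList_le _
    omega
  rw [pvMain sv (pvM sv [service]) (pvCalls sv service) [service] [] (N + 1) le_rfl (by omega)]
  rw [pvLoopInf_nil]
  show pvWalkDown sv ((N + 1) + 1) PySem.Set.empty service = _
  rw [pvWalkDown, if_neg (fun hv => hs0 ((PySem.Set.contains_iff PySem.Set.empty service).mp hv))]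
  rfl
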